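-- pv_equiv track=rewrite | github.com/Jack-Cherish/python-spider | video_downloader/MyQR/mylibs/data.py | numeric_encoding
-- ===== SOURCE A (Python) =====
-- def numeric_encoding(str):
--     str_list = [str[i:i+3] for i in range(0,len(str),3)]
--     code = ''
--     for i in str_list:
--         rqbin_len = 10
--         if len(i) == 1:
--             rqbin_len = 4
--         elif len(i) == 2:
--             rqbin_len = 7
--         code_temp = bin(int(i))[2:]
--         code += ('0'*(rqbin_len - len(code_temp)) + code_temp)
--     return code
-- ===== SOURCE B (Python) =====
-- def _bits(v, w):
--     # emit exactly w bits of v, LSB extracted first, prepended MSB-first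
--     out = ''
--     for _ in range(w):
--         out = ('1' if v % 2 else '0') + out
--         v //= 2
--     return out
--
--
-- def numeric_encoding(str):
--     if not str:
--         return ''
--     r = len(str) % 3 or 3
--     cut = len(str) - r
--     return numeric_encoding(str[:cut]) + _bits(int(str[cut:]), (0, 4, 7, 10)[r])
-- ===== Notes on version B (the rewrite author's own statement) =====
-- stated objective: alternative
-- what changed: B recurses from the right, peeling the last (len%3 or 3)-digit group each call before the recursive prefix, and produces each group's bits arithmetically with a div-2/mod-2 loop that prepends bits LSB-first, instead of A's left-to-right loop over pre-sliced chunks that formats each via bin() slicing and '0'*k string padding.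
-- outside the precondition, e.g. on numeric_encoding('-12'): A returns '00000b1100', B returns '1111110100'
import Mathlib
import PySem

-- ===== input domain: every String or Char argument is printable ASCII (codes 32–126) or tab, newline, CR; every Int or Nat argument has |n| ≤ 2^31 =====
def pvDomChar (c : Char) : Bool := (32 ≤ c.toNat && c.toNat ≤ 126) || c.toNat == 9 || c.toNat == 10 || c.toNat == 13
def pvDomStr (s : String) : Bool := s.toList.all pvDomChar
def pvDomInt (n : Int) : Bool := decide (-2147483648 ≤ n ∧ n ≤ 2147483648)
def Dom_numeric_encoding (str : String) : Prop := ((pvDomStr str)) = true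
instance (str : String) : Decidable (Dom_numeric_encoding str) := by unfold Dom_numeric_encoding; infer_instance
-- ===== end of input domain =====

-- B recurses from the right, peeling the last (len%3 or 3)-digit group each call, and emits
-- each group's bits arithmetically with a div-2/mod-2 loop, instead of A's left-to-right loop
-- over pre-sliced chunks formatted via bin() slicing and '0'*k padding (objective: alternative).

-- ===== PORT A =====
def numeric_encoding (str : String) : String :=
  let s := str.toList
  -- str_list = [str[i:i+3] for i in range(0, len(str), 3)]
  let str_list := (PySem.List.pyRange 0 (s.length : Int) 3).map
      (fun i => PySem.List.slice s (some i) (some (i + 3)))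
  String.ofList (str_list.foldl (fun code i =>
    -- rqbin_len = 10; if len(i) == 1: 4; elif len(i) == 2: 7
    let rqbin_len : Int := if i.length = 1 then 4 else if i.length = 2 then 7 else 10
    -- code_temp = bin(int(i))[2:]   (int(i) raises outside Pre_; the .getD 0 default is never read there)
    let code_temp : List Char :=
      PySem.List.slice (PySem.Int.toBinChars0b ((PySem.Int.ofChars? i).getD 0)) (some 2) none
    code ++ (PySem.List.pyRepeat ['0'] (rqbin_len - (code_temp.length : Int)) ++ code_temp)) [])

-- ===== PORT B =====
-- _bits(v, w): for _ in range(w): out = ('1' if v % 2 else '0') + out; v //= 2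
def pvBitsLoop : Nat → Int → List Char → List Char
  | 0, _, out => out
  | w + 1, v, out =>
      pvBitsLoop w (PySem.Int.floordiv v 2)
        ((if PySem.Int.mod v 2 ≠ 0 then '1' else '0') :: out)

-- r = len(str) % 3 or 3 ; cut = len(str) - r
def pvR (n : Nat) : Nat := if n % 3 = 0 then 3 else n % 3
def pvCut (n : Nat) : Nat := n - pvR n

-- int(str[cut:]) raises outside Pre_; the .getD 0 default is never read there
def numeric_encoding_alt_core (s : List Char) : List Char :=
  if h : s = [] then []
  else
    numeric_encoding_alt_core (PySem.List.slice s none (some ((pvCut s.length : Nat) : Int))) ++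
      pvBitsLoop ([0, 4, 7, 10].getD (pvR s.length) 0)
        ((PySem.Int.ofChars? (PySem.List.slice s (some ((pvCut s.length : Nat) : Int)) none)).getD 0) []
termination_by s.length
decreasing_by
  rw [PySem.List.slice_to_natCast, List.length_take]
  have hs : s.length ≠ 0 := fun hh => h (List.length_eq_zero_iff.mp hh)
  unfold pvCut pvR
  split_ifs <;> omega

def numeric_encoding_alt (str : String) : String :=
  String.ofList (numeric_encoding_alt_core str.toList)

-- ===== PRECONDITION & SPEC =====
-- the bit width A assigns to a group of this length
def pvWidthOf (ch : List Char) : Nat :=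
  if ch.length = 1 then 4 else if ch.length = 2 then 7 else 10
-- Pre_ requires every 3-character group of str to be int()-parsable with a nonnegative value
-- (otherwise A raises ValueError, or — for negative groups — returns accidental values of the
-- bin()[2:] slice, e.g. a 'b' kept in the output).  The width bound is stated explicitly but is
-- automatic for any group int() accepts: ≤ 3 characters parse to at most 999 < 2^10 (resp.
-- 99 < 2^7, 9 < 2^4), so it excludes no further inputs.
def Pre_numeric_encoding (str : String) : Prop :=
  ∀ k < str.toList.length, 3 * k < str.toList.length →
    0 ≤ (PySem.Int.ofChars? ((str.toList.drop (3 * k)).take 3)).getD (-1) ∧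
    (PySem.Int.ofChars? ((str.toList.drop (3 * k)).take 3)).getD (-1)
      < 2 ^ pvWidthOf ((str.toList.drop (3 * k)).take 3)
instance (str : String) : Decidable (Pre_numeric_encoding str) := by unfold Pre_numeric_encoding; infer_instance
def pvWitness_numeric_encoding : String := "0214"

def Spec_numeric_encoding (str : String) (out : String) : Prop := out = numeric_encoding_alt str
instance (str : String) (out : String) : Decidable (Spec_numeric_encoding str out) := by unfold Spec_numeric_encoding; infer_instance

-- ===== CLAIM (what is proved, stated in full; the proofs are below) =====
def Claim_equal_numeric_encoding : Prop := ∀ (str : String), Dom_numeric_encoding str → Pre_numeric_encoding str → Spec_numeric_encoding str (numeric_encoding str)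

-- ===== LEMMAS AND PROOFS =====

-- A's per-chunk contribution, as a function of the chunk
def pvChunkOut (i : List Char) : List Char :=
  let rqbin_len : Int := if i.length = 1 then 4 else if i.length = 2 then 7 else 10
  let code_temp : List Char :=
    PySem.List.slice (PySem.Int.toBinChars0b ((PySem.Int.ofChars? i).getD 0)) (some 2) none
  PySem.List.pyRepeat ['0'] (rqbin_len - (code_temp.length : Int)) ++ code_temp

-- B's per-chunk contribution
def pvBChunk (ch : List Char) : List Char :=
  pvBitsLoop ([0, 4, 7, 10].getD ch.length 0) ((PySem.Int.ofChars? ch).getD 0) []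

-- the chunk decomposition A's range/slice comprehension produces
def pvChunks : List Char → List (List Char)
  | a :: b :: c :: rest => [a, b, c] :: pvChunks rest
  | [] => []
  | rest => [rest]

theorem pvRange3_step (m : Nat) :
    PySem.List.pyRange 0 ((m : Int) + 3) 3 = 0 :: (PySem.List.pyRange 0 (m : Int) 3).map (· + 3) := by
  rw [PySem.List.pyRange_of_pos _ _ (by norm_num), PySem.List.pyRange_of_pos _ _ (by norm_num)]
  have hlt : (0:Int) < (m:Int) + 3 := by positivity
  rw [if_pos hlt]
  have hc : (((m:Int) + 3 - 0 + 3 - 1) / 3).toNat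
      = (if (0:Int) < (m:Int) then (((m:Int) - 0 + 3 - 1) / 3).toNat else 0) + 1 := by
    split_ifs <;> omega
  rw [hc, List.range_succ_eq_map, List.map_cons, List.map_map]
  refine congrArg _ ?_
  rw [List.map_map]
  exact List.map_congr_left (fun k _ => by simp [Function.comp]; ring)

theorem pvChunks_eq (l : List Char) :
    (PySem.List.pyRange 0 (l.length : Int) 3).map
      (fun i => PySem.List.slice l (some i) (some (i + 3))) = pvChunks l := by
  induction l using pvChunks.induct with
  | case1 a b c rest ih =>
      have hlen : ((a :: b :: c :: rest).length : Int) = (rest.length : Int) + 3 := by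
        simp; ring
      rw [hlen, pvRange3_step, List.map_cons, List.map_map,
        show pvChunks (a::b::c::rest) = [a,b,c] :: pvChunks rest from rfl]
      refine congrArg₂ _ ?_ ?_
      · rw [show (0:Int) = ((0:Nat):Int) from rfl, show ((0:Nat):Int)+3 = ((3:Nat):Int) from rfl,
          PySem.List.slice_natCast]
        simp
      · rw [← ih]
        refine List.map_congr_left (fun i hi => ?_)
        have h0 : 0 ≤ i := ((PySem.List.mem_pyRange_iff_of_pos (by norm_num) i).1 hi).1
        obtain ⟨j, rfl⟩ : ∃ j : Nat, i = (j : Int) := ⟨i.toNat, by omega⟩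
        show PySem.List.slice _ (some ((j:Int)+3)) (some ((j:Int)+3+3)) = _
        rw [show ((j:Int)+3) = ((j+3 : Nat):Int) by push_cast; ring,
            show (((j+3:Nat)):Int)+3 = ((j+6 : Nat):Int) by push_cast; ring,
            PySem.List.slice_natCast, PySem.List.slice_natCast]
        have h3 : (a :: b :: c :: rest).drop (j+3) = rest.drop j := by
          rw [show j + 3 = 3 + j by omega, ← List.drop_drop]
          rfl
        rw [h3]
        congr 1
        omega
  | case2 => decide
  | case3 rest h1 h2 =>
      rcases rest with _ | ⟨x, _ | ⟨y, _ | ⟨z, t⟩⟩⟩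
      · exact absurd rfl h2
      · have hr : PySem.List.pyRange 0 (((1:Nat)) : Int) 3 = [0] := by decide
        rw [show ((List.length [x] : Nat) : Int) = (((1:Nat)) : Int) from rfl, hr, List.map_cons, List.map_nil,
          show (0:Int) = ((0:Nat):Int) from rfl, show ((0:Nat):Int)+3 = ((3:Nat):Int) from rfl,
          PySem.List.slice_natCast]
        simp [pvChunks]
      · have hr : PySem.List.pyRange 0 (((2:Nat)) : Int) 3 = [0] := by decide
        rw [show ((List.length [x,y] : Nat) : Int) = (((2:Nat)) : Int) from rfl, hr, List.map_cons, List.map_nil,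
          show (0:Int) = ((0:Nat):Int) from rfl, show ((0:Nat):Int)+3 = ((3:Nat):Int) from rfl,
          PySem.List.slice_natCast]
        simp [pvChunks]
      · exact absurd rfl (h1 x y z t)

-- every chunk is a drop/take piece of the input
theorem pvChunks_mem {l ch : List Char} (h : ch ∈ pvChunks l) :
    ∃ k, 3 * k < l.length ∧ ch = (l.drop (3 * k)).take 3 := by
  induction l using pvChunks.induct with
  | case1 a b c rest ih =>
      rcases List.mem_cons.1 h with rfl | h
      · exact ⟨0, by simp, rfl⟩
      · obtain ⟨k, hk, rfl⟩ := ih h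
        refine ⟨k + 1, by simp; omega, ?_⟩
        rw [show 3 * (k + 1) = 3 + 3 * k by ring, ← List.drop_drop,
          show (a :: b :: c :: rest).drop 3 = rest from rfl]
  | case2 => cases h
  | case3 rest h1 h2 =>
      rcases rest with _ | ⟨x, _ | ⟨y, _ | ⟨z, t⟩⟩⟩
      · exact absurd rfl h2
      · rcases List.mem_cons.1 h with rfl | h
        · exact ⟨0, by simp, rfl⟩
        · cases h
      · rcases List.mem_cons.1 h with rfl | h
        · exact ⟨0, by simp, rfl⟩
        · cases h
      · exact absurd rfl (h1 x y z t)

-- sufficient fuel: toDigitsCore is toDigits with the accumulator appended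
theorem pvTDC (n : Nat) : ∀ (f : Nat) (acc : List Char), n < f →
    Nat.toDigitsCore 2 f n acc = Nat.toDigits 2 n ++ acc := by
  induction n using Nat.strong_induction_on with
  | _ n ih =>
    intro f acc hf
    obtain ⟨f, rfl⟩ : ∃ f', f = f' + 1 := ⟨f - 1, by omega⟩
    unfold Nat.toDigits
    simp only [Nat.toDigitsCore]
    by_cases h : n / 2 = 0
    · rw [if_pos h, if_pos h]
      rfl
    · rw [if_neg h, if_neg h]
      rw [ih (n / 2) (by omega) f _ (by omega),
          ih (n / 2) (by omega) n _ (by omega)]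
      simp

theorem pvTD_step (n : Nat) (h : 2 ≤ n) :
    Nat.toDigits 2 n = Nat.toDigits 2 (n / 2) ++ [Nat.digitChar (n % 2)] := by
  show Nat.toDigitsCore 2 (n + 1) n [] = _
  simp only [Nat.toDigitsCore]
  rw [if_neg (by omega)]
  exact pvTDC (n / 2) n _ (by omega)

-- msb-first bit list produced by B's loop, on Nats
def pvBitsNat : Nat → Nat → List Char
  | 0, _ => []
  | w + 1, n => pvBitsNat w (n / 2) ++ [if n % 2 = 1 then '1' else '0']

theorem pvBitsLoop_cast (w : Nat) : ∀ (n : Nat) (out : List Char),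
    pvBitsLoop w (n : Int) out = pvBitsNat w n ++ out := by
  induction w with
  | zero => intro n out; rfl
  | succ w ih =>
      intro n out
      show pvBitsLoop w (PySem.Int.floordiv (n:Int) 2) _ = _
      have h1 : PySem.Int.floordiv (n:Int) 2 = ((n / 2 : Nat) : Int) := by
        exact_mod_cast PySem.Int.floordiv_natCast n 2
      have h2 : ((if PySem.Int.mod (n:Int) 2 ≠ 0 then '1' else '0') : Char)
          = (if n % 2 = 1 then '1' else '0') := by
        have hm : PySem.Int.mod (n:Int) 2 = ((n % 2 : Nat) : Int) := by
          exact_mod_cast PySem.Int.mod_natCast n 2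
        rw [hm]
        split_ifs with ha hb <;> first | rfl | omega
      rw [h1, h2, ih]
      show pvBitsNat w (n / 2) ++ _ = (pvBitsNat w (n / 2) ++ [_]) ++ out
      simp

theorem pvBitsNat_zero (w : Nat) : pvBitsNat w 0 = List.replicate w '0' := by
  induction w with
  | zero => rfl
  | succ w ih =>
      show pvBitsNat w 0 ++ ['0'] = _
      rw [ih, List.replicate_succ']

theorem pvBitsNat_eq : ∀ (w : Nat), 1 ≤ w → ∀ n : Nat, n < 2 ^ w →
    pvBitsNat w n = List.replicate (w - (Nat.toDigits 2 n).length) '0' ++ Nat.toDigits 2 n := by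
  intro w
  induction w with
  | zero => omega
  | succ w ih =>
    intro _ n hn
    by_cases h2 : n < 2
    · interval_cases n
      · show pvBitsNat w 0 ++ ['0'] = _
        rw [pvBitsNat_zero, show Nat.toDigits 2 0 = ['0'] from rfl]
        simp
      · show pvBitsNat w (1 / 2) ++ ['1'] = _
        rw [show (1:Nat) / 2 = 0 from rfl, pvBitsNat_zero,
          show Nat.toDigits 2 1 = ['1'] from rfl]
        simp
    · have h2' : 2 ≤ n := by omega
      have hw1 : 1 ≤ w := by
        by_contra hw
        have : w = 0 := by omega
        subst this
        simp at hn
        omega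
      have hhalf : n / 2 < 2 ^ w := by
        rw [pow_succ] at hn
        omega
      show pvBitsNat w (n / 2) ++ [if n % 2 = 1 then '1' else '0'] = _
      rw [ih hw1 (n / 2) hhalf, pvTD_step n h2']
      have hb : ((if n % 2 = 1 then '1' else '0') : Char) = Nat.digitChar (n % 2) := by
        rcases Nat.mod_two_eq_zero_or_one n with h | h <;> rw [h] <;> rfl
      have hl : (w + 1) - (Nat.toDigits 2 (n / 2) ++ [Nat.digitChar (n % 2)]).length
          = w - (Nat.toDigits 2 (n / 2)).length := by
        simp
      rw [hb, hl, List.append_assoc]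

-- A's pad-and-slice of bin(v) equals B's bit loop, for 0 ≤ v < 2^w
theorem pvPadBits (w : Nat) (v : Int) (h0 : 0 ≤ v) (hlt : v < 2 ^ w) (hw : 1 ≤ w) :
    PySem.List.pyRepeat ['0']
        ((w:Int) - ((PySem.List.slice (PySem.Int.toBinChars0b v) (some 2) none).length : Int))
      ++ PySem.List.slice (PySem.Int.toBinChars0b v) (some 2) none
      = pvBitsLoop w v [] := by
  obtain ⟨n, rfl⟩ : ∃ n : Nat, v = (n : Int) := ⟨v.toNat, by omega⟩
  have hn : n < 2 ^ w := by exact_mod_cast hlt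
  have hbin : PySem.Int.toBinChars0b (n:Int) = '0' :: 'b' :: Nat.toDigits 2 (n:Int).toNat := by
    unfold PySem.Int.toBinChars0b
    rw [if_neg (by omega)]
  rw [hbin, show (2:Int) = ((2:Nat):Int) from rfl, PySem.List.slice_from_natCast,
    show ('0' :: 'b' :: Nat.toDigits 2 (n:Int).toNat).drop 2 = Nat.toDigits 2 (n:Int).toNat from rfl,
    Int.toNat_natCast, PySem.List.pyRepeat_singleton, pvBitsLoop_cast, List.append_nil,
    pvBitsNat_eq w hw n hn]
  congr 1
  congr 1
  omega

-- B's per-chunk output equals A's, on any 1..3-char chunk parsing inside the width bound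
theorem pvChunk_eq (ch : List Char) (h1 : 1 ≤ ch.length) (h3 : ch.length ≤ 3)
    (v : Int) (hv : PySem.Int.ofChars? ch = some v) (h0 : 0 ≤ v)
    (hlt : v < 2 ^ pvWidthOf ch) :
    pvChunkOut ch = pvBChunk ch := by
  unfold pvChunkOut pvBChunk
  rw [hv]
  simp only [Option.getD_some]
  have hcase : ch.length = 1 ∨ ch.length = 2 ∨ ch.length = 3 := by omega
  have hwv : pvWidthOf ch = 4 ∨ pvWidthOf ch = 7 ∨ pvWidthOf ch = 10 := by
    unfold pvWidthOf
    rcases hcase with h | h | h <;> rw [h] <;> simp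
  have hgetD : ([0, 4, 7, 10].getD ch.length 0 : Nat) = pvWidthOf ch := by
    unfold pvWidthOf
    rcases hcase with h | h | h <;> rw [h] <;> rfl
  have hA : ((if ch.length = 1 then 4 else if ch.length = 2 then 7 else 10) : Int)
      = ((pvWidthOf ch : Nat) : Int) := by
    unfold pvWidthOf
    split_ifs <;> norm_num
  rw [hA, hgetD]
  exact pvPadBits (pvWidthOf ch) v h0 hlt (by rcases hwv with h | h | h <;> omega)

theorem pvA_eq (l : List Char) :
    ((PySem.List.pyRange 0 (l.length : Int) 3).map
      (fun i => PySem.List.slice l (some i) (some (i + 3)))).foldl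
        (fun code i => code ++ pvChunkOut i) []
      = ((pvChunks l).map pvChunkOut).flatten := by
  rw [PySem.List.foldl_append_eq_flatMap, List.nil_append, pvChunks_eq, List.flatMap_def]

-- peeling the last group: pvChunks decomposes as prefix chunks ++ [last group]
theorem pvChunks_snoc (l : List Char) (h : l ≠ []) :
    pvChunks l = pvChunks (l.take (pvCut l.length)) ++ [l.drop (pvCut l.length)] := by
  induction l using pvChunks.induct with
  | case1 a b c rest ih =>
      by_cases hr : rest = []
      · subst hr
        show [[a,b,c]] = pvChunks (List.take (pvCut 3) [a,b,c]) ++ [List.drop (pvCut 3) [a,b,c]]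
        rw [show pvCut 3 = 0 from rfl]
        rfl
      · have hm : (a :: b :: c :: rest).length = rest.length + 3 := by simp
        have hle : pvR rest.length ≤ rest.length := by
          have : rest.length ≠ 0 := fun hh => hr (List.length_eq_zero_iff.mp hh)
          unfold pvR
          split_ifs <;> omega
        have hR : pvR (rest.length + 3) = pvR rest.length := by
          unfold pvR
          have : (rest.length + 3) % 3 = rest.length % 3 := by omega
          rw [this]
        have hC : pvCut (rest.length + 3) = pvCut rest.length + 3 := by
          unfold pvCut
          rw [hR]
          omega
        rw [hm, hC,
          show (a :: b :: c :: rest).take (pvCut rest.length + 3)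
            = a :: b :: c :: rest.take (pvCut rest.length) from rfl,
          show (a :: b :: c :: rest).drop (pvCut rest.length + 3)
            = rest.drop (pvCut rest.length) from rfl,
          show pvChunks (a :: b :: c :: rest) = [a,b,c] :: pvChunks rest from rfl,
          show pvChunks (a :: b :: c :: rest.take (pvCut rest.length))
            = [a,b,c] :: pvChunks (rest.take (pvCut rest.length)) from rfl,
          ih hr, List.cons_append]
  | case2 => exact absurd rfl h
  | case3 rest h1 h2 =>
      rcases rest with _ | ⟨x, _ | ⟨y, _ | ⟨z, t⟩⟩⟩
      · exact absurd rfl h2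
      · show [[x]] = pvChunks (List.take (pvCut 1) [x]) ++ [List.drop (pvCut 1) [x]]
        rw [show pvCut 1 = 0 from rfl]
        rfl
      · show [[x,y]] = pvChunks (List.take (pvCut 2) [x,y]) ++ [List.drop (pvCut 2) [x,y]]
        rw [show pvCut 2 = 0 from rfl]
        rfl
      · exact absurd rfl (h1 x y z t)

-- B computes the flattened per-chunk outputs
theorem pvCore_nil : numeric_encoding_alt_core [] = [] := by
  rw [numeric_encoding_alt_core]
  simp

theorem pvB_eq (N : Nat) : ∀ l : List Char, l.length ≤ N →
    numeric_encoding_alt_core l = ((pvChunks l).map pvBChunk).flatten := by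
  induction N with
  | zero =>
      intro l hl
      have : l = [] := List.length_eq_zero_iff.mp (by omega)
      subst this
      rw [pvCore_nil]
      rfl
  | succ N ih =>
      intro l hl
      by_cases h : l = []
      · subst h
        rw [pvCore_nil]
        rfl
      · rw [numeric_encoding_alt_core]
        rw [dif_neg h, PySem.List.slice_to_natCast, PySem.List.slice_from_natCast]
        have hlen : l.length ≠ 0 := fun hh => h (List.length_eq_zero_iff.mp hh)
        have hle : pvR l.length ≤ l.length := by
          unfold pvR; split_ifs <;> omega
        have hR1 : 1 ≤ pvR l.length := by
          unfold pvR; split_ifs <;> omega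
        have hcut : pvCut l.length < l.length := by
          unfold pvCut; omega
        rw [ih (l.take (pvCut l.length)) (by simp; omega)]
        rw [pvChunks_snoc l h, List.map_append, List.flatten_append]
        have hdl : (l.drop (pvCut l.length)).length = pvR l.length := by
          rw [List.length_drop]
          unfold pvCut
          omega
        show _ ++ pvBitsLoop ([0,4,7,10].getD (pvR l.length) 0) _ []
            = _ ++ ([pvBChunk (l.drop (pvCut l.length))]).flatten
        unfold pvBChunk
        rw [hdl]
        simp

-- ===== VERDICT (by name: the statement is the Claim_ definition above) =====
theorem numeric_encoding_spec : Claim_equal_numeric_encoding := by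
  intro str _ hpre
  show numeric_encoding str = numeric_encoding_alt str
  have hA : numeric_encoding str = String.ofList (((pvChunks str.toList).map pvChunkOut).flatten) := by
    show String.ofList (((PySem.List.pyRange 0 (str.toList.length : Int) 3).map
        (fun i => PySem.List.slice str.toList (some i) (some (i + 3)))).foldl
          (fun code i => code ++ pvChunkOut i) []) = _
    exact congrArg _ (pvA_eq str.toList)
  have hB : numeric_encoding_alt str = String.ofList (((pvChunks str.toList).map pvBChunk).flatten) := by
    exact congrArg _ (pvB_eq str.toList.length str.toList le_rfl)
  rw [hA, hB]
  refine congrArg _ (congrArg _ (List.map_congr_left (fun ch hch => ?_)))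
  obtain ⟨k, hk, rfl⟩ := pvChunks_mem hch
  have hk' : k < str.toList.length := by omega
  obtain ⟨hpos, hbound⟩ := hpre k hk' hk
  set ch := (str.toList.drop (3 * k)).take 3 with hch_def
  have hlen1 : 1 ≤ ch.length := by
    rw [hch_def, List.length_take, List.length_drop]
    omega
  have hlen3 : ch.length ≤ 3 := by
    rw [hch_def, List.length_take]
    exact min_le_left _ _
  cases hv : PySem.Int.ofChars? ch with
  | none =>
      rw [hv] at hpos
      simp at hpos
  | some v =>
      rw [hv] at hpos hbound
      simp only [Option.getD_some] at hpos hbound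
      exact pvChunk_eq ch hlen1 hlen3 v hv hpos hbound
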